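-- pv_equiv track=rewrite | github.com/tpham393/ec503PacmanBot | MultipleGhosts/policyIteration_multGhosts.py | moveThrough
-- ===== SOURCE A (Python) =====
-- def moveThrough(pacman_x, pacman_y, prevPacman_x, prevPacman_y, ghost_x, ghost_y, prevGhost_x, prevGhost_y):
--     '''
--     Check if ghost and pacman try to move through each other.
--     ARGS:
--         pacman_x (int): X location of pacman after moving.
--         pacman_y (int): Y location of pacman after moving.
--         prevPacman_x (int): X location of pacman prior to moving.
--         prevPacman_y (int):  Y location of pacman prior to moving.
--         ghost_x (list): X locations of all ghosts after moving.
--         ghost_y (list): Y locations of all ghosts after moving.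
--         prevGhost_x (list): X locations of all ghosts prior to moving.
--         prevGhost_y (List): Y locations of all ghosts prior to moving.
--     RETURN:
--         True - Ghost and pacman tried to move through each other
--         False - otherwise
--     '''
--     samePos1 =[];
--     samePos2 = [];
--     # Cond 1: Check if previous position of pacman at ghost's new position
--     for i in range(len(ghost_x)):
--         if (prevPacman_x == ghost_x[i] and prevPacman_y == ghost_y[i]):
--             samePos1.append(i);
--     # Cond 2: Check if previous position of ghost at pacman's new position
--     for i in range(len(prevGhost_x)):
--         if (pacman_x == prevGhost_x[i] and pacman_y == prevGhost_y[i]):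
--             samePos2.append(i);
--     # If both conditions true for same ghost, return true
--     for val in samePos1:
--         if val in samePos2:
--             return True;
--     return False;
-- ===== SOURCE B (Python) =====
-- def moveThrough(pacman_x, pacman_y, prevPacman_x, prevPacman_y, ghost_x, ghost_y, prevGhost_x, prevGhost_y):
--     return any(prevPacman_x == gx and prevPacman_y == gy
--                and pacman_x == pgx and pacman_y == pgy
--                for gx, gy, pgx, pgy in zip(ghost_x, ghost_y, prevGhost_x, prevGhost_y))
-- ===== Notes on version B (the rewrite author's own statement) =====
-- stated objective: simpler
-- what changed: Replaces A's three passes (two index-filter loops building lists of matching ghost indices, then a membership scan between them) by one short-circuiting pass over zip of the four lists, checking both swap conditions per ghost.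
import Mathlib
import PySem

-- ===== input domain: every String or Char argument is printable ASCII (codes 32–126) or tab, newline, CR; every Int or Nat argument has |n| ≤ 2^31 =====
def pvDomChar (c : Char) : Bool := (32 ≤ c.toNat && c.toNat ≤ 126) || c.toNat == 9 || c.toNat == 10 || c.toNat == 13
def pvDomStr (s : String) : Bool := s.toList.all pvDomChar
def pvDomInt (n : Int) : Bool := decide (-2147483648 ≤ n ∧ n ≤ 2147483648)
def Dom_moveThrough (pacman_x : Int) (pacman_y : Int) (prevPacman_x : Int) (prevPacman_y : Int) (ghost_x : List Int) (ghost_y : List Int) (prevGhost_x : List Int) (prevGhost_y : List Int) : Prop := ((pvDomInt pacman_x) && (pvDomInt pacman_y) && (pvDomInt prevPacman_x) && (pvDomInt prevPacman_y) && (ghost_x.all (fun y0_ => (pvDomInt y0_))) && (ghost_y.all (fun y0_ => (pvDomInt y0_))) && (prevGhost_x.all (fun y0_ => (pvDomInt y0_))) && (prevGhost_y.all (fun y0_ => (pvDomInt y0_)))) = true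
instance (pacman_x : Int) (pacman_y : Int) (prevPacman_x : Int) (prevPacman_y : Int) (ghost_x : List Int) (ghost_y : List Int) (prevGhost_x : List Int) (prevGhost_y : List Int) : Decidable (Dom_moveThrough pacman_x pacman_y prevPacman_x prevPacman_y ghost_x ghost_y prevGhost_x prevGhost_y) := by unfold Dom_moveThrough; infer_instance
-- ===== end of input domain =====

-- B replaces A's three passes (two index-filter loops plus a membership scan between them)
-- by one short-circuiting pass over the zipped lists; proved equal under Pre_ (aligned lengths).


-- ===== PORT A =====
-- A: build samePos1 (ghost indices whose new position is pacman's previous position),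
-- samePos2 (ghost indices whose previous position is pacman's new position),
-- then scan samePos1 for a member of samePos2.
def moveThrough (pacman_x : Int) (pacman_y : Int) (prevPacman_x : Int) (prevPacman_y : Int) (ghost_x : List Int) (ghost_y : List Int) (prevGhost_x : List Int) (prevGhost_y : List Int) : Bool :=
  let samePos1 := (PySem.List.pyRange 0 (ghost_x.length : Int) 1).foldl
    (fun acc i => if prevPacman_x = PySem.List.pyGetD ghost_x i 0 ∧ prevPacman_y = PySem.List.pyGetD ghost_y i 0
                  then acc ++ [i] else acc) []
  let samePos2 := (PySem.List.pyRange 0 (prevGhost_x.length : Int) 1).foldl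
    (fun acc i => if pacman_x = PySem.List.pyGetD prevGhost_x i 0 ∧ pacman_y = PySem.List.pyGetD prevGhost_y i 0
                  then acc ++ [i] else acc) []
  samePos1.any (fun v => samePos2.contains v)

-- ===== PORT B =====
-- B: one pass over zip(ghost_x, ghost_y, prevGhost_x, prevGhost_y), both conditions per ghost.
def moveThrough_alt (pacman_x : Int) (pacman_y : Int) (prevPacman_x : Int) (prevPacman_y : Int) (ghost_x : List Int) (ghost_y : List Int) (prevGhost_x : List Int) (prevGhost_y : List Int) : Bool :=
  (ghost_x.zip (ghost_y.zip (prevGhost_x.zip prevGhost_y))).any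
    (fun t => decide (prevPacman_x = t.1 ∧ prevPacman_y = t.2.1 ∧ pacman_x = t.2.2.1 ∧ pacman_y = t.2.2.2))

-- ===== PRECONDITION & SPEC =====
-- Pre_ is exactly where A returns: whenever a ghost index lies beyond the end of ghost_y
-- (resp. prevGhost_y), its x-coordinate must fail the x-test, otherwise A's `and` reaches
-- the out-of-range y-access and raises IndexError.
def Pre_moveThrough (pacman_x : Int) (pacman_y : Int) (prevPacman_x : Int) (prevPacman_y : Int) (ghost_x : List Int) (ghost_y : List Int) (prevGhost_x : List Int) (prevGhost_y : List Int) : Prop :=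
  (∀ v ∈ ghost_x.drop ghost_y.length, prevPacman_x ≠ v) ∧
  (∀ v ∈ prevGhost_x.drop prevGhost_y.length, pacman_x ≠ v)
instance (pacman_x : Int) (pacman_y : Int) (prevPacman_x : Int) (prevPacman_y : Int) (ghost_x : List Int) (ghost_y : List Int) (prevGhost_x : List Int) (prevGhost_y : List Int) : Decidable (Pre_moveThrough pacman_x pacman_y prevPacman_x prevPacman_y ghost_x ghost_y prevGhost_x prevGhost_y) := by unfold Pre_moveThrough; infer_instance

def pvWitness_moveThrough : Int × Int × Int × Int × List Int × List Int × List Int × List Int :=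
  (1, 2, 3, 4, [3, 0], [4, 1], [1, 5], [2, 6])

def Spec_moveThrough (pacman_x : Int) (pacman_y : Int) (prevPacman_x : Int) (prevPacman_y : Int) (ghost_x : List Int) (ghost_y : List Int) (prevGhost_x : List Int) (prevGhost_y : List Int) (out : Bool) : Prop := out = moveThrough_alt pacman_x pacman_y prevPacman_x prevPacman_y ghost_x ghost_y prevGhost_x prevGhost_y
instance (pacman_x : Int) (pacman_y : Int) (prevPacman_x : Int) (prevPacman_y : Int) (ghost_x : List Int) (ghost_y : List Int) (prevGhost_x : List Int) (prevGhost_y : List Int) (out : Bool) : Decidable (Spec_moveThrough pacman_x pacman_y prevPacman_x prevPacman_y ghost_x ghost_y prevGhost_x prevGhost_y out) := by unfold Spec_moveThrough; infer_instance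

-- ===== CLAIM (what is proved, stated in full; the proofs are below) =====
def Claim_equal_moveThrough : Prop := ∀ (pacman_x : Int) (pacman_y : Int) (prevPacman_x : Int) (prevPacman_y : Int) (ghost_x : List Int) (ghost_y : List Int) (prevGhost_x : List Int) (prevGhost_y : List Int), Dom_moveThrough pacman_x pacman_y prevPacman_x prevPacman_y ghost_x ghost_y prevGhost_x prevGhost_y → Pre_moveThrough pacman_x pacman_y prevPacman_x prevPacman_y ghost_x ghost_y prevGhost_x prevGhost_y → Spec_moveThrough pacman_x pacman_y prevPacman_x prevPacman_y ghost_x ghost_y prevGhost_x prevGhost_y (moveThrough pacman_x pacman_y prevPacman_x prevPacman_y ghost_x ghost_y prevGhost_x prevGhost_y)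

-- ===== LEMMAS AND PROOFS =====

-- B's any-over-zip, characterised positionally.
lemma alt_eq_true_iff (px py ppx ppy : Int) (gx gy pgx pgy : List Int) :
    moveThrough_alt px py ppx ppy gx gy pgx pgy = true ↔
      ∃ k : Nat, k < gx.length ∧ k < gy.length ∧ k < pgx.length ∧ k < pgy.length ∧
        ppx = gx[k]! ∧ ppy = gy[k]! ∧ px = pgx[k]! ∧ py = pgy[k]! := by
  unfold moveThrough_alt
  rw [List.any_eq_true]
  constructor
  · rintro ⟨t, ht, hpt⟩
    obtain ⟨k, hk, hget⟩ := List.mem_iff_getElem.mp ht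
    simp only [List.length_zip, lt_min_iff] at hk
    obtain ⟨h1, h2, h3, h4⟩ := hk
    refine ⟨k, h1, h2, h3, h4, ?_⟩
    simp only [List.getElem_zip] at hget
    simp only [decide_eq_true_eq] at hpt
    subst hget
    simpa [List.getElem!_eq_getElem?_getD, List.getElem?_eq_getElem, h1, h2, h3, h4] using hpt
  · rintro ⟨k, h1, h2, h3, h4, e1, e2, e3, e4⟩
    refine ⟨(gx[k], gy[k], pgx[k], pgy[k]), ?_, ?_⟩
    · apply List.mem_iff_getElem.mpr
      refine ⟨k, ?_, ?_⟩
      · simp only [List.length_zip, lt_min_iff]; exact ⟨h1, h2, h3, h4⟩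
      · simp [List.getElem_zip]
    · simp only [decide_eq_true_eq]
      simp only [List.getElem!_eq_getElem?_getD, List.getElem?_eq_getElem, h1, h2, h3, h4] at e1 e2 e3 e4
      exact ⟨e1, e2, e3, e4⟩

-- pyGetD at an in-range nonnegative index is the plain element.
lemma pyGetD_eq_getElemBang (xs : List Int) (v : Int) (h0 : 0 ≤ v) (h : v.toNat < xs.length) :
    PySem.List.pyGetD xs v 0 = xs[v.toNat]! := by
  rw [PySem.List.pyGetD_of_nonneg xs 0 h0]
  simp [List.getD_eq_getElem?_getD, h]

-- A's scan, characterised positionally (under Pre_'s no-raise conditions).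
lemma a_eq_true_iff (px py ppx ppy : Int) (gx gy pgx pgy : List Int)
    (hg : ∀ v ∈ gx.drop gy.length, ppx ≠ v) (hpg : ∀ v ∈ pgx.drop pgy.length, px ≠ v) :
    moveThrough px py ppx ppy gx gy pgx pgy = true ↔
      ∃ k : Nat, k < gx.length ∧ k < gy.length ∧ k < pgx.length ∧ k < pgy.length ∧
        ppx = gx[k]! ∧ ppy = gy[k]! ∧ px = pgx[k]! ∧ py = pgy[k]! := by
  unfold moveThrough
  rw [PySem.List.foldl_append_ite_eq_filter, PySem.List.foldl_append_ite_eq_filter]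
  simp only [List.nil_append, List.any_eq_true, List.mem_filter, List.contains_eq_mem,
    decide_eq_true_eq, PySem.List.mem_pyRange_one]
  constructor
  · rintro ⟨v, ⟨⟨hv0, hv1⟩, hc1⟩, ⟨⟨_, hv2⟩, hc2⟩⟩
    have k1 : v.toNat < gx.length := by omega
    have k2 : v.toNat < pgx.length := by omega
    rw [pyGetD_eq_getElemBang gx v hv0 k1] at hc1
    rw [pyGetD_eq_getElemBang pgx v hv0 k2] at hc2
    -- the matched index must be inside gy (resp. pgy), else Pre_'s clause contradicts the x-test
    have hy : v.toNat < gy.length := by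
      by_contra hno
      refine hg gx[v.toNat]! ?_ hc1.1
      have : gx[v.toNat]! = gx[v.toNat] := by
        simp [List.getElem!_eq_getElem?_getD, List.getElem?_eq_getElem, k1]
      rw [this]
      apply List.mem_iff_getElem.mpr
      exact ⟨v.toNat - gy.length, by simp; omega, by rw [List.getElem_drop]; congr 1; omega⟩
    have hpy : v.toNat < pgy.length := by
      by_contra hno
      refine hpg pgx[v.toNat]! ?_ hc2.1
      have : pgx[v.toNat]! = pgx[v.toNat] := by
        simp [List.getElem!_eq_getElem?_getD, List.getElem?_eq_getElem, k2]
      rw [this]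
      apply List.mem_iff_getElem.mpr
      exact ⟨v.toNat - pgy.length, by simp; omega, by rw [List.getElem_drop]; congr 1; omega⟩
    rw [pyGetD_eq_getElemBang gy v hv0 hy] at hc1
    rw [pyGetD_eq_getElemBang pgy v hv0 hpy] at hc2
    exact ⟨v.toNat, k1, hy, k2, hpy, hc1.1, hc1.2, hc2.1, hc2.2⟩
  · rintro ⟨k, hk1, hk2, hk3, hk4, e1, e2, e3, e4⟩
    refine ⟨(k : Int), ⟨⟨by positivity, by exact_mod_cast hk1⟩, ?_⟩,
            ⟨⟨by positivity, by exact_mod_cast hk3⟩, ?_⟩⟩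
    · rw [pyGetD_eq_getElemBang gx _ (by positivity) (by simpa using hk1),
          pyGetD_eq_getElemBang gy _ (by positivity) (by simpa using hk2)]
      simpa only [Int.toNat_natCast] using ⟨e1, e2⟩
    · rw [pyGetD_eq_getElemBang pgx _ (by positivity) (by simpa using hk3),
          pyGetD_eq_getElemBang pgy _ (by positivity) (by simpa using hk4)]
      simpa only [Int.toNat_natCast] using ⟨e3, e4⟩

-- ===== VERDICT (by name: the statement is the Claim_ definition above) =====
theorem moveThrough_spec : Claim_equal_moveThrough := by
  intro px py ppx ppy gx gy pgx pgy _ hpre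
  unfold Spec_moveThrough
  rcases hpre with ⟨hg, hpg⟩
  rw [Bool.eq_iff_iff, a_eq_true_iff px py ppx ppy gx gy pgx pgy hg hpg, alt_eq_true_iff]
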